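-- pv_equiv track=rewrite | github.com/princessupload/lotto-news | CRITICAL_TICKET_AUDIT.py | calculate_bonus_score
-- ===== SOURCE A (Python) =====
-- from collections import Counter, defaultdict
--
-- def calculate_bonus_score(ticket_bonus, draws):
--     """Calculate bonus ball frequency score."""
--     bonus_counter = Counter()
--     for draw in draws:
--         bonus = draw.get('bonus')
--         if bonus:
--             bonus_counter[bonus] += 1
--
--     rankings = bonus_counter.most_common()
--     for rank, (num, count) in enumerate(rankings):
--         if num == ticket_bonus:
--             return len(rankings) - rank
--     return 0
-- ===== SOURCE B (Python) =====
-- def calculate_bonus_score(ticket_bonus, draws):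
--     """Calculate bonus ball frequency score."""
--     counts = {}
--     for draw in draws:
--         b = draw.get('bonus')
--         if b:
--             counts[b] = counts.get(b, 0) + 1
--     if ticket_bonus not in counts:
--         return 0
--     ct = counts[ticket_bonus]
--     seen = False
--     score = 0
--     for num, c in counts.items():
--         if num == ticket_bonus:
--             seen = True
--             score += 1
--         elif c < ct or (c == ct and seen):
--             score += 1
--     return score
-- ===== Notes on version B (the rewrite author's own statement) =====
-- stated objective: alternative
-- what changed: B drops the most_common() sort entirely: it builds the same counter dict, then does one sort-free pass over its items counting the entries ranked at-or-after the target under the stable-sort rule (smaller count, or equal count and inserted at-or-after the target), which equals len(rankings) - rank.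
import Mathlib
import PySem

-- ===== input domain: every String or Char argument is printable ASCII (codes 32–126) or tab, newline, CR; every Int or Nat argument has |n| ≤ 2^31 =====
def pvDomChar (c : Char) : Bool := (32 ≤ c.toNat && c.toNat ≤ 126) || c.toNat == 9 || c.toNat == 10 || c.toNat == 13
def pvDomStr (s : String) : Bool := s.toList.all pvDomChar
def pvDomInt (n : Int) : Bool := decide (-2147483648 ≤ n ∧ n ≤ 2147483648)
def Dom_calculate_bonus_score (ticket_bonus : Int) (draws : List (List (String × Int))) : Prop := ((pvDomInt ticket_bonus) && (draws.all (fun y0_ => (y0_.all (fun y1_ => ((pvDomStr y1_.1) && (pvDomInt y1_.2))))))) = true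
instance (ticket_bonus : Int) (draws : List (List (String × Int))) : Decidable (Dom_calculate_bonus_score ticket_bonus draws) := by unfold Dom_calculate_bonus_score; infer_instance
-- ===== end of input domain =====

-- B replaces A's sort-then-rank ('most_common' + scan) by one sort-free pass over the
-- counter that counts the entries ranked at-or-after the target (stable-sort tie rule
-- = insertion order); objective: alternative.

-- ===== PORT A =====
-- the search loop 'for rank, (num, count) in enumerate(rankings): if num == ticket: return len - rank'
def pvRankLoop (ticket n : Int) : List (Int × Int) → Int → Int
  | [], _ => 0
  | (num, _) :: rest, rank => if num = ticket then n - rank else pvRankLoop ticket n rest (rank + 1)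

def calculate_bonus_score (ticket_bonus : Int) (draws : List (List (String × Int))) : Int :=
  let bonus_counter := draws.foldl (fun d draw =>
    match (PySem.Dict.mk draw).get? "bonus" with
    | some b => if b ≠ 0 then d.modify b 0 (· + 1) else d
    | none => d) PySem.Dict.empty
  let rankings := PySem.List.sorted bonus_counter.items (fun kv => kv.2) true
  pvRankLoop ticket_bonus (rankings.length : Int) rankings 0

-- ===== PORT B =====
-- one step of B's single pass over counts.items() with state (seen, score)
def pvStepB (t ct : Int) (st : Bool × Int) (p : Int × Int) : Bool × Int :=
  if p.1 = t then (true, st.2 + 1)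
  else if p.2 < ct ∨ (p.2 = ct ∧ st.1 = true) then (st.1, st.2 + 1)
  else st

def calculate_bonus_score_alt (ticket_bonus : Int) (draws : List (List (String × Int))) : Int :=
  let counts := draws.foldl (fun d draw =>
    match (PySem.Dict.mk draw).get? "bonus" with
    | some b => if b ≠ 0 then d.insert b (d.getD b 0 + 1) else d
    | none => d) PySem.Dict.empty
  if counts.contains ticket_bonus then
    (counts.items.foldl (pvStepB ticket_bonus (counts.getD ticket_bonus 0)) (false, 0)).2
  else 0

-- ===== PRECONDITION & SPEC =====
def Spec_calculate_bonus_score (ticket_bonus : Int) (draws : List (List (String × Int))) (out : Int) : Prop := out = calculate_bonus_score_alt ticket_bonus draws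
instance (ticket_bonus : Int) (draws : List (List (String × Int))) (out : Int) : Decidable (Spec_calculate_bonus_score ticket_bonus draws out) := by unfold Spec_calculate_bonus_score; infer_instance

-- ===== CLAIM (what is proved, stated in full; the proofs are below) =====
def Claim_equal_calculate_bonus_score : Prop := ∀ (ticket_bonus : Int) (draws : List (List (String × Int))), Dom_calculate_bonus_score ticket_bonus draws → Spec_calculate_bonus_score ticket_bonus draws (calculate_bonus_score ticket_bonus draws)

-- ===== LEMMAS AND PROOFS =====

-- the list of counted bonuses, in draw order
def pvBonuses (draws : List (List (String × Int))) : List Int :=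
  draws.filterMap (fun draw =>
    match (PySem.Dict.mk draw).get? "bonus" with
    | some b => if b ≠ 0 then some b else none
    | none => none)

-- length of the suffix of S starting at the first pair whose key is t (0 if absent)
def pvSuffLen (t : Int) : List (Int × Int) → Int
  | [] => 0
  | p :: rest => if p.1 = t then ((p :: rest).length : Int) else pvSuffLen t rest

lemma pvFoldA (draws : List (List (String × Int))) (d : PySem.Dict Int Int) :
    draws.foldl (fun d draw =>
      match (PySem.Dict.mk draw).get? "bonus" with
      | some b => if b ≠ 0 then d.modify b 0 (· + 1) else d
      | none => d) d
    = (pvBonuses draws).foldl (fun d x => d.modify x 0 (· + 1)) d := by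
  induction draws generalizing d with
  | nil => rfl
  | cons a l ih =>
    simp only [List.foldl_cons, pvBonuses, List.filterMap_cons]
    cases h : (PySem.Dict.mk a).get? "bonus" with
    | none => exact ih d
    | some b =>
      dsimp only
      by_cases hb : b = 0
      · rw [if_neg (not_not_intro hb), if_neg (not_not_intro hb)]
        exact ih d
      · rw [if_pos hb, if_pos hb, List.foldl_cons]
        exact ih _

lemma pvFoldB (draws : List (List (String × Int))) (d : PySem.Dict Int Int) :
    draws.foldl (fun d draw =>
      match (PySem.Dict.mk draw).get? "bonus" with
      | some b => if b ≠ 0 then d.insert b (d.getD b 0 + 1) else d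
      | none => d) d
    = (pvBonuses draws).foldl (fun d x => d.insert x (d.getD x 0 + 1)) d := by
  induction draws generalizing d with
  | nil => rfl
  | cons a l ih =>
    simp only [List.foldl_cons, pvBonuses, List.filterMap_cons]
    cases h : (PySem.Dict.mk a).get? "bonus" with
    | none => exact ih d
    | some b =>
      dsimp only
      by_cases hb : b = 0
      · rw [if_neg (not_not_intro hb), if_neg (not_not_intro hb)]
        exact ih d
      · rw [if_pos hb, if_pos hb, List.foldl_cons]
        exact ih _

lemma pvRankLoop_not_found (t n : Int) :
    ∀ (S : List (Int × Int)) (rank : Int), t ∉ S.map Prod.fst → pvRankLoop t n S rank = 0 := by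
  intro S
  induction S with
  | nil => intro rank _; rfl
  | cons p rest ih =>
    intro rank h
    simp only [List.map_cons, List.mem_cons, not_or] at h
    obtain ⟨p1, p2⟩ := p
    simp only [pvRankLoop]
    rw [if_neg (fun hh => h.1 hh.symm)]
    exact ih _ h.2

lemma pvRankLoop_found (t : Int) :
    ∀ (S : List (Int × Int)) (n rank : Int), t ∈ S.map Prod.fst →
      pvRankLoop t n S rank = pvSuffLen t S + n - rank - S.length := by
  intro S
  induction S with
  | nil => intro n rank h; simp at h
  | cons p rest ih =>
    intro n rank h
    obtain ⟨p1, p2⟩ := p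
    simp only [pvRankLoop, pvSuffLen]
    by_cases hp : p1 = t
    · rw [if_pos hp, if_pos hp]
      simp only [List.length_cons]
      push_cast
      ring
    · rw [if_neg hp, if_neg hp]
      simp only [List.map_cons, List.mem_cons] at h
      rcases h with h | h
      · exact absurd h.symm hp
      · rw [ih n (rank + 1) h]
        simp only [List.length_cons]
        push_cast
        ring

lemma pvStepB_seen (t ct : Int) :
    ∀ (ps : List (Int × Int)) (b : Bool) (s : Int),
      (ps.foldl (pvStepB t ct) (b, s)).1 = (b || ps.any (fun a => a.1 == t)) := by
  intro ps
  induction ps with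
  | nil => intro b s; simp
  | cons p l ih =>
    intro b s
    simp only [List.foldl_cons, List.any_cons, pvStepB]
    by_cases hp : p.1 = t
    · simp [hp, ih]
    · rw [if_neg hp]
      have hbeq : (p.1 == t) = false := beq_eq_false_iff_ne.mpr hp
      by_cases hcond : p.2 < ct ∨ (p.2 = ct ∧ b = true)
      · rw [if_pos hcond, ih, hbeq]
        simp
      · rw [if_neg hcond, ih, hbeq]
        simp

lemma pvStepB_not_seen (t ct : Int) :
    ∀ (ps : List (Int × Int)) (s : Int), t ∉ ps.map Prod.fst →
      (ps.foldl (pvStepB t ct) (false, s)).2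
        = s + (ps.countP (fun a => decide (a.2 < ct)) : Int) := by
  intro ps
  induction ps with
  | nil => intro s _; simp
  | cons p l ih =>
    intro s h
    simp only [List.map_cons, List.mem_cons, not_or] at h
    have hp : ¬ p.1 = t := fun hh => h.1 hh.symm
    simp only [List.foldl_cons, pvStepB, List.countP_cons]
    rw [if_neg hp]
    by_cases hlt : p.2 < ct
    · have hcond : (p.2 < ct ∨ (p.2 = ct ∧ false = true)) := Or.inl hlt
      rw [if_pos hcond, ih _ h.2]
      simp [hlt]
      ring
    · have hcond : ¬ (p.2 < ct ∨ (p.2 = ct ∧ false = true)) := by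
        rintro (hh | ⟨_, hh⟩) <;> simp_all
      rw [if_neg hcond, ih _ h.2]
      simp [hlt]

lemma pvLength_insertBy {α : Type} (f : α → α → Bool) (x : α) :
    ∀ (l : List α), (PySem.List.insertBy f x l).length = l.length + 1 := by
  intro l
  induction l with
  | nil => rfl
  | cons y ys ih =>
    simp only [PySem.List.insertBy]
    by_cases h : f x y
    · simp [h]
    · simp [h, ih]

-- inserting p (whose key is the target) into a descending-sorted S not containing the key
lemma pvSuffLen_insert_self (p : Int × Int) :
    ∀ (S : List (Int × Int)), S.Pairwise (fun a b => b.2 ≤ a.2) → p.1 ∉ S.map Prod.fst →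
      pvSuffLen p.1 (PySem.List.insertBy (fun a b => decide (b.2 < a.2)) p S)
        = 1 + (S.countP (fun a => decide (a.2 < p.2)) : Int) := by
  intro S
  induction S with
  | nil => intro _ _; simp [PySem.List.insertBy, pvSuffLen]
  | cons y ys ih =>
    intro hpw hmem
    simp only [List.map_cons, List.mem_cons, not_or] at hmem
    have hpy : p.1 ≠ y.1 := hmem.1
    have hpw' := List.pairwise_cons.mp hpw
    by_cases hcmp : y.2 < p.2
    · have heq : PySem.List.insertBy (fun a b => decide (b.2 < a.2)) p (y :: ys)
          = p :: y :: ys := by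
        simp [PySem.List.insertBy, hcmp]
      rw [heq]
      simp only [pvSuffLen]
      have hcount : (y :: ys).countP (fun a => decide (a.2 < p.2)) = (y :: ys).length := by
        rw [List.countP_eq_length]
        intro a ha
        rcases List.mem_cons.mp ha with h | h
        · subst h; simpa using hcmp
        · have := hpw'.1 a h
          simp only [decide_eq_true_eq]
          omega
      rw [hcount]
      simp only [List.length_cons]
      push_cast
      ring
    · have heq : PySem.List.insertBy (fun a b => decide (b.2 < a.2)) p (y :: ys)
          = y :: PySem.List.insertBy (fun a b => decide (b.2 < a.2)) p ys := by
        simp [PySem.List.insertBy, hcmp]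
      rw [heq]
      simp only [pvSuffLen]
      rw [if_neg (fun hh => hpy hh.symm)]
      rw [ih hpw'.2 hmem.2]
      simp [hcmp]

-- inserting p (key ≠ t) into a descending-sorted S containing (t, ct)
lemma pvSuffLen_insert_other (t ct : Int) (p : Int × Int) (hp : p.1 ≠ t) :
    ∀ (S : List (Int × Int)), S.Pairwise (fun a b => b.2 ≤ a.2) →
      (S.map Prod.fst).Nodup → (t, ct) ∈ S →
      pvSuffLen t (PySem.List.insertBy (fun a b => decide (b.2 < a.2)) p S)
        = pvSuffLen t S + (if p.2 ≤ ct then 1 else 0) := by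
  intro S
  induction S with
  | nil => intro _ _ hmem; simp at hmem
  | cons y ys ih =>
    intro hpw hnd hmem
    have hpw' := List.pairwise_cons.mp hpw
    simp only [List.map_cons, List.nodup_cons] at hnd
    by_cases hcmp : y.2 < p.2
    · have heq : PySem.List.insertBy (fun a b => decide (b.2 < a.2)) p (y :: ys)
          = p :: y :: ys := by
        simp [PySem.List.insertBy, hcmp]
      rw [heq]
      have hct : ct ≤ y.2 := by
        rcases List.mem_cons.mp hmem with h | h
        · rw [← h]
        · exact hpw'.1 _ h
      rw [if_neg (show ¬ p.2 ≤ ct by omega)]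
      have h0 : pvSuffLen t (p :: y :: ys) = pvSuffLen t (y :: ys) := by
        simp only [pvSuffLen]
        rw [if_neg hp]
      rw [h0]
      ring
    · have heq : PySem.List.insertBy (fun a b => decide (b.2 < a.2)) p (y :: ys)
          = y :: PySem.List.insertBy (fun a b => decide (b.2 < a.2)) p ys := by
        simp [PySem.List.insertBy, hcmp]
      rw [heq]
      by_cases hyt : y.1 = t
      · have hy : y = (t, ct) := by
          rcases List.mem_cons.mp hmem with h | h
          · exact h.symm
          · exfalso
            exact hnd.1 (hyt ▸ List.mem_map.mpr ⟨_, h, rfl⟩)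
        simp only [pvSuffLen]
        rw [if_pos hyt, if_pos hyt]
        rw [List.length_cons, pvLength_insertBy]
        have hple : p.2 ≤ ct := by
          have : ct = y.2 := by rw [hy]
          omega
        rw [if_pos hple]
        simp only [List.length_cons]
        push_cast
        ring
      · have hmem' : (t, ct) ∈ ys := by
          rcases List.mem_cons.mp hmem with h | h
          · exact absurd (by rw [← h]) hyt
          · exact h
        simp only [pvSuffLen]
        rw [if_neg hyt, if_neg hyt]
        exact ih hpw'.2 hnd.2 hmem'

lemma pvSorted_rev_append_singleton (ps : List (Int × Int)) (p : Int × Int) :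
    PySem.List.sorted (ps ++ [p]) (fun kv => kv.2) true
      = PySem.List.insertBy (fun a b => decide (b.2 < a.2)) p
          (PySem.List.sorted ps (fun kv => kv.2) true) := by
  rw [PySem.List.sorted_rev_eq_foldl_insertBy, PySem.List.sorted_rev_eq_foldl_insertBy,
    List.foldl_append]
  rfl

lemma pvStepB_hit (t ct : Int) (st : Bool × Int) (p : Int × Int) (hp : p.1 = t) :
    (pvStepB t ct st p).2 = st.2 + 1 := by
  unfold pvStepB
  rw [if_pos hp]

lemma pvStepB_miss (t ct : Int) (st : Bool × Int) (p : Int × Int) (hp : p.1 ≠ t)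
    (hseen : st.1 = true) :
    (pvStepB t ct st p).2 = st.2 + (if p.2 ≤ ct then 1 else 0) := by
  unfold pvStepB
  rw [if_neg hp]
  by_cases hle : p.2 ≤ ct
  · have hcond : p.2 < ct ∨ (p.2 = ct ∧ st.1 = true) := by
      rcases lt_or_eq_of_le hle with h | h
      · exact Or.inl h
      · exact Or.inr ⟨h, hseen⟩
    rw [if_pos hcond, if_pos hle]
  · have hcond : ¬ (p.2 < ct ∨ (p.2 = ct ∧ st.1 = true)) := by
      rintro (h | ⟨h, _⟩) <;> omega
    rw [if_neg hcond, if_neg hle]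
    ring

-- the heart: suffix length of the target in the stable reverse sort = B's single-pass count
lemma pvMain (t ct : Int) :
    ∀ (ps : List (Int × Int)), (ps.map Prod.fst).Nodup → (t, ct) ∈ ps →
      pvSuffLen t (PySem.List.sorted ps (fun kv => kv.2) true)
        = (ps.foldl (pvStepB t ct) (false, 0)).2 := by
  intro ps
  induction ps using List.reverseRecOn with
  | nil => intro _ hmem; simp at hmem
  | append_singleton ps p ih =>
    intro hnd hmem
    rw [pvSorted_rev_append_singleton]
    have hS_pw := PySem.List.sorted_pairwise_rev ps (fun kv => kv.2)
    have hperm := PySem.List.sorted_perm ps (fun kv => kv.2) true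
    rw [List.map_append, List.map_cons, List.map_nil, List.nodup_append] at hnd
    have hnd1 : (ps.map Prod.fst).Nodup := hnd.1
    have hnp : p.1 ∉ ps.map Prod.fst := fun hcon =>
      (hnd.2.2 _ hcon _ (List.mem_singleton.mpr rfl)) rfl
    rw [List.foldl_append, List.foldl_cons, List.foldl_nil]
    rcases List.mem_append.mp hmem with hmem' | hmem'
    · -- (t, ct) comes earlier; the new pair p has another key
      have hpt : p.1 ≠ t := fun h => hnp (h ▸ List.mem_map.mpr ⟨_, hmem', rfl⟩)
      have hmemS : (t, ct) ∈ PySem.List.sorted ps (fun kv => kv.2) true :=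
        hperm.mem_iff.mpr hmem'
      have hndS : ((PySem.List.sorted ps (fun kv => kv.2) true).map Prod.fst).Nodup :=
        ((hperm.map Prod.fst).nodup_iff).mpr hnd1
      rw [pvSuffLen_insert_other t ct p hpt _ hS_pw hndS hmemS, ih hnd1 hmem']
      have hseen : (ps.foldl (pvStepB t ct) (false, 0)).1 = true := by
        rw [pvStepB_seen]
        simp only [Bool.false_or, List.any_eq_true]
        exact ⟨(t, ct), hmem', by simp⟩
      rw [pvStepB_miss t ct _ p hpt hseen]
    · -- p itself is the target pair
      have hpeq : p = (t, ct) := (List.mem_singleton.mp hmem').symm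
      subst hpeq
      have htps : t ∉ ps.map Prod.fst := hnp
      have htS : ((t, ct) : Int × Int).1
          ∉ (PySem.List.sorted ps (fun kv => kv.2) true).map Prod.fst := by
        intro hcon
        exact htps (((hperm.map Prod.fst).mem_iff).mp hcon)
      have hins := pvSuffLen_insert_self (t, ct)
        (PySem.List.sorted ps (fun kv => kv.2) true) hS_pw htS
      simp only at hins
      rw [hins, hperm.countP_eq]
      rw [pvStepB_hit t ct _ _ rfl]
      rw [pvStepB_not_seen t ct ps 0 htps]
      ring

theorem calculate_bonus_score_spec : Claim_equal_calculate_bonus_score := by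
  intro t draws _hdom
  unfold Spec_calculate_bonus_score calculate_bonus_score calculate_bonus_score_alt
  simp only [pvFoldA, pvFoldB, ← PySem.Dict.counter_eq_foldl,
    PySem.Dict.foldl_insert_getD_add_one_eq_counter]
  set bs := pvBonuses draws with hbs
  rw [PySem.Dict.contains_counter, PySem.Dict.getD_counter, PySem.Dict.items_counter]
  set items := (PySem.Set.ofList bs).map (fun k => (k, (bs.count k : Int))) with hitems
  have hkeys : items.map Prod.fst = PySem.Set.ofList bs := by
    simp [hitems, List.map_map, Function.comp_def]
  by_cases hc : t ∈ bs
  · rw [if_pos (by simpa [List.contains_iff_mem] using hc)]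
    have htk : t ∈ items.map Prod.fst := by
      rw [hkeys]
      exact (PySem.Set.mem_ofList bs t).mpr hc
    have hperm := PySem.List.sorted_perm items (fun kv => kv.2) true
    have htS : t ∈ (PySem.List.sorted items (fun kv => kv.2) true).map Prod.fst :=
      ((hperm.map Prod.fst).mem_iff).mpr htk
    rw [pvRankLoop_found t _ _ 0 htS]
    have hnd : (items.map Prod.fst).Nodup := by
      rw [hkeys]; exact PySem.Set.nodup_ofList bs
    have hmem : (t, (bs.count t : Int)) ∈ items := by
      rw [hitems]
      exact List.mem_map.mpr ⟨t, (PySem.Set.mem_ofList bs t).mpr hc, rfl⟩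
    rw [pvMain t (bs.count t : Int) items hnd hmem]
    ring
  · rw [if_neg (by simpa [List.contains_iff_mem] using hc)]
    apply pvRankLoop_not_found
    intro hcon
    have hperm := PySem.List.sorted_perm items (fun kv => kv.2) true
    have : t ∈ items.map Prod.fst := ((hperm.map Prod.fst).mem_iff).mp hcon
    rw [hkeys] at this
    exact hc ((PySem.Set.mem_ofList bs t).mp this)
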